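-- pv_equiv track=rewrite | github.com/haizhou/minihack | kg_prior.py | query_chain
-- ===== SOURCE A (Python) =====
-- def query_chain(graph, start, relation, then_target_relation, final):
--     """
--     查询两跳关系链：
--     start -[relation]-> X -[then_target_relation]-> final
--     返回中间节点 X 的列表
--     """
--     mid_nodes = []
--     for e in graph.get(start, []):
--         if e['relation'] == relation:
--             mid = e['target']
--             for e2 in graph.get(final, []):
--                 if e2['relation'] == then_target_relation and e2['target'] == mid:
--                     mid_nodes.append(mid)
--     return mid_nodes
-- ===== SOURCE B (Python) =====
-- def query_chain(graph, start, relation, then_target_relation, final):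
--     # Count matching final-side targets once, then emit each mid count[mid] times per start edge.
--     counts = {}
--     for e2 in graph.get(final, []):
--         if e2['relation'] == then_target_relation:
--             t = e2['target']
--             counts[t] = counts.get(t, 0) + 1
--     out = []
--     for e in graph.get(start, []):
--         if e['relation'] == relation:
--             mid = e['target']
--             out.extend([mid] * counts.get(mid, 0))
--     return out
-- ===== Notes on version B (the rewrite author's own statement) =====
-- stated objective: alternative
-- what changed: B builds a counting dict of the final node's matching edge targets in one pass and emits each mid node count[mid] times, replacing A's inner scan of the final edge list for every matching start edge.
-- outside the precondition, e.g. on query_chain({'f': [{}]}, 's', 'r', 't', 'f'): A returns [], B raises KeyError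
import Mathlib
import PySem

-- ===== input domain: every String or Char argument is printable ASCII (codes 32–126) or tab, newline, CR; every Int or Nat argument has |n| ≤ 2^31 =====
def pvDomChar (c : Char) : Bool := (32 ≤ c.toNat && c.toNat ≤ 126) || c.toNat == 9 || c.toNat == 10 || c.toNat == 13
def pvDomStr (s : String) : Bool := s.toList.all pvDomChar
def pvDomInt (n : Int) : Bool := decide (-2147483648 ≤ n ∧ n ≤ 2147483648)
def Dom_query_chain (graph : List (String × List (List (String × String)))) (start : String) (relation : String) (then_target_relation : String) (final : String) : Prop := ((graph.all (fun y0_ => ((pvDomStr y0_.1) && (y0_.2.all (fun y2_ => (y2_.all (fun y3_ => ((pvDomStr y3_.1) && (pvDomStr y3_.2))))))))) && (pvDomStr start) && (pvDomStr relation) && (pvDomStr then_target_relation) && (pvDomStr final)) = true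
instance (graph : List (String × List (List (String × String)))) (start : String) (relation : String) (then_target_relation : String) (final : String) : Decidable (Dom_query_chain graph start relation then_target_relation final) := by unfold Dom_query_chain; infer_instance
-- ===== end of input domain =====

-- B replaces A's inner scan of final's edges (per matching start-edge) by a counting dict
-- built once, emitting each mid count[mid] times (alternative single-pass decomposition).

-- shared helpers: graph.get(k, []) (dict lookup = first match) and e['k'] (value under Pre_)
def pvEdges (graph : List (String × List (List (String × String)))) (k : String) : List (List (String × String)) :=
  ((graph.find? (fun p => p.1 == k)).map (·.2)).getD []

def pvGetKey (e : List (String × String)) (k : String) : String :=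
  ((e.find? (fun p => p.1 == k)).map (·.2)).getD ""

-- ===== PORT A =====
def query_chain (graph : List (String × List (List (String × String)))) (start : String) (relation : String) (then_target_relation : String) (final : String) : List String :=
  (pvEdges graph start).foldl (fun mid_nodes e =>
    if pvGetKey e "relation" == relation then
      let mid := pvGetKey e "target"
      (pvEdges graph final).foldl (fun mid_nodes e2 =>
        if pvGetKey e2 "relation" == then_target_relation && pvGetKey e2 "target" == mid then
          mid_nodes ++ [mid]
        else mid_nodes) mid_nodes
    else mid_nodes) []

-- ===== PORT B =====
def query_chain_alt (graph : List (String × List (List (String × String)))) (start : String) (relation : String) (then_target_relation : String) (final : String) : List String :=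
  let counts : PySem.Dict String Nat :=
    (pvEdges graph final).foldl (fun counts e2 =>
      if pvGetKey e2 "relation" == then_target_relation then
        counts.modify (pvGetKey e2 "target") 0 (· + 1)
      else counts) PySem.Dict.empty
  (pvEdges graph start).foldl (fun out e =>
    if pvGetKey e "relation" == relation then
      let mid := pvGetKey e "target"
      out ++ List.replicate (counts.getD mid 0) mid
    else out) []

-- ===== PRECONDITION & SPEC =====
-- Pre_ excludes inputs where an inspected edge dict lacks the 'relation' (or, when its
-- relation matches, the 'target') key: there Python raises KeyError — A whenever it reaches
-- the edge, B always on final-side edges; so Pre_ also excludes graphs A returns [] on only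
-- because no start edge matched before a malformed final-side edge was reached (see cites).
def Pre_query_chain (graph : List (String × List (List (String × String)))) (start : String) (relation : String) (then_target_relation : String) (final : String) : Prop :=
  (∀ e ∈ ((graph.find? (fun p => p.1 == start)).map (·.2)).getD [],
      ((e.find? (fun p => p.1 == "relation")).isSome = true) ∧
      (((e.find? (fun p => p.1 == "relation")).map (·.2)).getD "" = relation →
        (e.find? (fun p => p.1 == "target")).isSome = true)) ∧
  (∀ e2 ∈ ((graph.find? (fun p => p.1 == final)).map (·.2)).getD [],
      ((e2.find? (fun p => p.1 == "relation")).isSome = true) ∧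
      (((e2.find? (fun p => p.1 == "relation")).map (·.2)).getD "" = then_target_relation →
        (e2.find? (fun p => p.1 == "target")).isSome = true))
instance (graph : List (String × List (List (String × String)))) (start : String) (relation : String) (then_target_relation : String) (final : String) : Decidable (Pre_query_chain graph start relation then_target_relation final) := by unfold Pre_query_chain; infer_instance

def pvWitness_query_chain : (List (String × List (List (String × String)))) × String × String × String × String :=
  ([("s", [[("relation", "r"), ("target", "m")]]), ("f", [[("relation", "t"), ("target", "m")]])], "s", "r", "t", "f")

def Spec_query_chain (graph : List (String × List (List (String × String)))) (start : String) (relation : String) (then_target_relation : String) (final : String) (out : List String) : Prop := out = query_chain_alt graph start relation then_target_relation final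
instance (graph : List (String × List (List (String × String)))) (start : String) (relation : String) (then_target_relation : String) (final : String) (out : List String) : Decidable (Spec_query_chain graph start relation then_target_relation final out) := by unfold Spec_query_chain; infer_instance

-- ===== CLAIM (what is proved, stated in full; the proofs are below) =====
def Claim_equal_query_chain : Prop := ∀ (graph : List (String × List (List (String × String)))) (start : String) (relation : String) (then_target_relation : String) (final : String), Dom_query_chain graph start relation then_target_relation final → Pre_query_chain graph start relation then_target_relation final → Spec_query_chain graph start relation then_target_relation final (query_chain graph start relation then_target_relation final)

-- ===== LEMMAS AND PROOFS =====

-- A's inner loop appends mid once per matching final-side edge.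
theorem pv_inner_eq (F : List (List (String × String))) (tr mid : String) (acc : List String) :
    F.foldl (fun mid_nodes e2 =>
      if pvGetKey e2 "relation" == tr && pvGetKey e2 "target" == mid then
        mid_nodes ++ [mid]
      else mid_nodes) acc
    = acc ++ List.replicate
        (F.countP (fun e2 => pvGetKey e2 "relation" == tr && pvGetKey e2 "target" == mid)) mid := by
  rw [PySem.List.foldl_append_if (f := fun _ => mid)]
  congr 1
  rw [List.countP_eq_length_filter, List.map_const']

-- B's counting dict holds, at key m, the number of matching final-side edges with target m.
theorem pv_counts_eq (F : List (List (String × String))) (tr m : String) :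
    (F.foldl (fun counts e2 =>
        if pvGetKey e2 "relation" == tr then
          counts.modify (pvGetKey e2 "target") 0 (· + 1)
        else counts) (PySem.Dict.empty : PySem.Dict String Nat)).getD m 0
    = F.countP (fun e2 => pvGetKey e2 "relation" == tr && pvGetKey e2 "target" == m) := by
  rw [PySem.List.foldl_if_eq_foldl_filter]
  rw [show (List.foldl (fun (counts : PySem.Dict String Nat) e2 => counts.modify (pvGetKey e2 "target") 0 (· + 1))
        PySem.Dict.empty (List.filter (fun e2 => pvGetKey e2 "relation" == tr) F))
      = List.foldl (fun counts x => counts.modify x 0 (· + 1)) PySem.Dict.empty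
          ((List.filter (fun e2 => pvGetKey e2 "relation" == tr) F).map (fun e2 => pvGetKey e2 "target"))
      by exact (List.foldl_map (f := fun e2 => pvGetKey e2 "target")
        (g := fun (counts : PySem.Dict String Nat) x => counts.modify x 0 (· + 1))).symm]
  rw [PySem.Dict.getD_foldl_modify_add_one_nat]
  simp [List.count_eq_countP, List.countP_map, List.countP_filter, Function.comp]
  apply List.countP_congr
  intro e2 _
  simp [Bool.and_comm]

-- ===== VERDICT (by name: the statement is the Claim_ definition above) =====
theorem query_chain_spec : Claim_equal_query_chain := by
  intro graph start relation tr final _ _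
  unfold Spec_query_chain query_chain query_chain_alt
  apply PySem.List.foldl_congr_mem
  intro acc e _
  by_cases h : pvGetKey e "relation" == relation
  · simp only [h, if_true, pv_inner_eq, pv_counts_eq]
  · simp [h]
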